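-- pv_equiv track=rewrite | github.com/tomo-playground/sdd-orchestrator | backend/services/prompt/prompt.py | normalize_tag_spaces
-- ===== SOURCE A (Python) =====
-- def normalize_tag_spaces(tags: list[str]) -> list[str]:
--     """Normalize tag format: spaces to underscores.
--
--     Stable Diffusion uses underscores, not spaces.
--     Example:
--     - "thumbs up" → "thumbs_up"
--     - " _day " → "day" (strips leading/trailing underscores)
--     - "tag__1" → "tag_1" (deduplicates underscores)
--     """
--     normalized = []
--     for tag in tags:
--         # 1. Strip whitespace
--         t = tag.strip()
--         if not t:
--             continue
--
--         # 2. Replace spaces with underscores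
--         t = t.replace(" ", "_")
--
--         # 3. Strip leading/trailing underscores (Fix for _day, _sun)
--         t = t.strip("_")
--
--         # 4. Collapse multiple underscores
--         while "__" in t:
--             t = t.replace("__", "_")
--
--         if t:
--             normalized.append(t)
--
--     return normalized
-- ===== SOURCE B (Python) =====
-- def normalize_tag_spaces(tags: list[str]) -> list[str]:
--     """Normalize tag format: spaces to underscores."""
--     normalized = []
--     for tag in tags:
--         t = tag.strip()
--         if not t:
--             continue
--         t = t.replace(" ", "_")
--         # split on underscores, drop empty segments, rejoin: this both strips
--         # leading/trailing underscores and collapses runs in one pass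
--         t = "_".join(part for part in t.split("_") if part)
--         if t:
--             normalized.append(t)
--     return normalized
-- ===== Notes on version B (the rewrite author's own statement) =====
-- stated objective: simpler
-- what changed: The strip('_') plus repeated replace('__','_') fixpoint loop is replaced by a single split('_')/filter/join pass over the list of non-empty segments.
import Mathlib
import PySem

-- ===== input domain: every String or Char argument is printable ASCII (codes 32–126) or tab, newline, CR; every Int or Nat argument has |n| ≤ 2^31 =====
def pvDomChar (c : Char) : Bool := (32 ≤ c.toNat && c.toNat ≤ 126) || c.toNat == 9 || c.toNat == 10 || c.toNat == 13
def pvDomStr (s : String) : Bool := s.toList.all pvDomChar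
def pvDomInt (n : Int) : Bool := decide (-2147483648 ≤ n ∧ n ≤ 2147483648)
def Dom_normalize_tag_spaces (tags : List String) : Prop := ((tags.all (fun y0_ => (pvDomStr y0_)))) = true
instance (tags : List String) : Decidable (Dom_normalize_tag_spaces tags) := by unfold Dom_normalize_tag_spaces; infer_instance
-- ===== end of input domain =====

-- B replaces A's strip('_') + repeated replace('__','_') fixpoint loop by one split/filter/join pass; return values proved equal on all inputs.

-- ===== PORT A =====
-- A-side helper: one left-to-right pass of t.replace("__", "_") as a structural recursion
def fpass : List Char → List Char
  | [] => []
  | [c] => [c]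
  | c :: d :: t => if c = '_' ∧ d = '_' then '_' :: fpass t else c :: fpass (d :: t)

-- A-side helper: Bool for '"__" not in t'
def noDD : List Char → Bool
  | [] => true
  | [_] => true
  | c :: d :: t => if c = '_' ∧ d = '_' then false else noDD (d :: t)

-- termination lemmas for the while-loop port (cited by name in its decreasing_by)
theorem replace_go_eq_fpass (fuel : Nat) : ∀ (l acc : List Char), l.length ≤ fuel →
    PySem.Chars.replace.go ['_','_'] ['_'] fuel l acc = acc.reverse ++ fpass l := by
  induction fuel with
  | zero =>
    intro l acc h
    have : l = [] := List.eq_nil_of_length_eq_zero (Nat.le_zero.mp h)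
    subst this; simp [PySem.Chars.replace.go, fpass]
  | succ n ih =>
    intro l acc h
    match l with
    | [] => simp [PySem.Chars.replace.go, fpass]
    | [c] =>
      have hpre : List.isPrefixOf ['_','_'] [c] = false := by
        simp [List.isPrefixOf]
      simp only [PySem.Chars.replace.go, hpre]
      rw [ih [] (c :: acc) (by simp)]
      simp [fpass]
    | c :: d :: t =>
      by_cases hc : c = '_' ∧ d = '_'
      · obtain ⟨rfl, rfl⟩ := hc
        have hpre : List.isPrefixOf ['_','_'] ('_'::'_'::t) = true := by
          simp [List.isPrefixOf]
        simp only [PySem.Chars.replace.go, hpre, if_pos, List.length_cons, List.drop_succ_cons,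
          List.drop_zero, List.length_nil, List.reverse_cons, List.reverse_nil, List.nil_append]
        rw [show (['_'] : List Char) ++ acc = '_'::acc from rfl]
        rw [ih t ('_' :: acc) (by simp at h ⊢; omega)]
        simp [fpass]
      · have hpre : List.isPrefixOf ['_','_'] (c::d::t) = false := by
          simp [List.isPrefixOf]
          tauto
        simp only [PySem.Chars.replace.go, hpre]
        rw [ih (d::t) (c :: acc) (by simp at h ⊢; omega)]
        simp [fpass, hc]

theorem replace_dd_eq_fpass (s : List Char) :
    PySem.Chars.replace s ['_', '_'] ['_'] = fpass s := by
  simp only [PySem.Chars.replace, List.isEmpty_cons, Bool.false_eq_true, if_false]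
  exact replace_go_eq_fpass s.length s [] le_rfl

theorem noDD_eq_false_iff (s : List Char) : noDD s = false ↔ ['_','_'] <:+: s := by
  induction s using noDD.induct with
  | case1 => simp [noDD]
  | case2 c =>
    simp only [noDD, Bool.true_eq_false, false_iff]
    intro h; have := h.length_le; simp at this
  | case3 c d t hc =>
    obtain ⟨rfl, rfl⟩ := hc
    simp only [noDD, and_self, if_pos trivial, true_iff]
    exact ⟨[], t, rfl⟩
  | case4 c d t hc ih =>
    rw [noDD, if_neg hc, ih]
    constructor
    · rintro ⟨u, v, huv⟩; exact ⟨c :: u, v, by rw [← huv]; rfl⟩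
    · intro h
      rcases List.infix_cons_iff.mp h with hp | h'
      · rw [List.cons_prefix_cons] at hp; obtain ⟨h1, hp⟩ := hp
        rw [List.cons_prefix_cons] at hp; obtain ⟨h2, -⟩ := hp
        exact absurd ⟨h1.symm, h2.symm⟩ hc
      · exact h' 

theorem isIn_dd_eq_not_noDD (s : List Char) :
    PySem.Chars.isIn ['_', '_'] s = !noDD s := by
  cases h : noDD s with
  | false =>
    simp only [Bool.not_false]
    exact (PySem.Chars.isIn_iff_infix _ _).mpr ((noDD_eq_false_iff s).mp h)
  | true =>
    simp only [Bool.not_true]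
    rw [PySem.Chars.isIn_eq_false_iff]
    intro hin
    rw [(noDD_eq_false_iff s).mpr hin] at h; exact absurd h (by simp)

theorem fpass_length_le (s : List Char) : (fpass s).length ≤ s.length := by
  induction s using fpass.induct with
  | case1 => simp [fpass]
  | case2 c => simp [fpass]
  | case3 c d t hc ih =>
    obtain ⟨rfl, rfl⟩ := hc
    simp [fpass]; omega
  | case4 c d t hc ih =>
    rw [fpass, if_neg hc]
    simp only [List.length_cons] at ih ⊢; omega

theorem fpass_length_lt (s : List Char) (h : noDD s = false) :
    (fpass s).length < s.length := by
  induction s using fpass.induct with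
  | case1 => simp [noDD] at h
  | case2 c => simp [noDD] at h
  | case3 c d t hc ih =>
    obtain ⟨rfl, rfl⟩ := hc
    have := fpass_length_le t
    simp [fpass]; omega
  | case4 c d t hc ih =>
    rw [noDD, if_neg hc] at h
    rw [fpass, if_neg hc]
    have := ih h
    simp only [List.length_cons] at this ⊢; omega

-- A-side helper: the 'while "__" in t: t = t.replace("__", "_")' loop
def collapseA (t : String) : String :=
  if PySem.Str.isIn "__" t then collapseA (PySem.Str.replace t "__" "_") else t
termination_by t.toList.length
decreasing_by
  rename_i h
  have h' : PySem.Chars.isIn ['_', '_'] t.toList = true := by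
    simpa [PySem.Str.isIn_eq] using h
  have hnd : noDD t.toList = false := by
    rw [isIn_dd_eq_not_noDD] at h'; simpa using h'
  simpa [PySem.Str.toList_replace, replace_dd_eq_fpass] using fpass_length_lt t.toList hnd

def normalize_tag_spaces (tags : List String) : List String :=
  tags.foldl
    (fun normalized tag =>
      let t := PySem.Str.strip tag
      if t == "" then normalized
      else
        let t := PySem.Str.replace t " " "_"
        let t := PySem.Str.stripChars t "_"
        let t := collapseA t
        if t == "" then normalized else normalized ++ [t])
    []

-- ===== PORT B =====
def normalize_tag_spaces_alt (tags : List String) : List String :=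
  tags.foldl
    (fun normalized tag =>
      let t := PySem.Str.strip tag
      if t == "" then normalized
      else
        let t := PySem.Str.replace t " " "_"
        let t := PySem.Str.join "_"
          (((PySem.Str.split? t "_").getD []).filter (fun part => !(part == "")))
        if t == "" then normalized else normalized ++ [t])
    []

-- ===== PRECONDITION & SPEC =====
def Spec_normalize_tag_spaces (tags : List String) (out : List String) : Prop := out = normalize_tag_spaces_alt tags
instance (tags : List String) (out : List String) : Decidable (Spec_normalize_tag_spaces tags out) := by unfold Spec_normalize_tag_spaces; infer_instance

-- ===== CLAIM (what is proved, stated in full; the proofs are below) =====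
def Claim_equal_normalize_tag_spaces : Prop := ∀ (tags : List String), Dom_normalize_tag_spaces tags → Spec_normalize_tag_spaces tags (normalize_tag_spaces tags)

-- ===== LEMMAS AND PROOFS =====

-- the underscore test, as `decide` so `simp` normal forms match
def pU : Char → Bool := fun c => decide (c = '_')

-- canonical single-pass collapse: drops each underscore run, emitting one '_'
-- only when a non-empty remainder follows
def hcol : List Char → List Char
  | [] => []
  | c :: t =>
    if c = '_' then
      (if t.dropWhile pU = [] then [] else '_' :: hcol (t.dropWhile pU))
    else c :: hcol t
termination_by s => s.length
decreasing_by
  · have := List.length_dropWhile_le pU t; simpa using Nat.lt_succ_of_le this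
  · simp

theorem hcol_nil : hcol [] = [] := by rw [hcol]

theorem hcol_cons_ne (c : Char) (t : List Char) (hc : c ≠ '_') :
    hcol (c :: t) = c :: hcol t := by rw [hcol, if_neg hc]

theorem hcol_cons_us (t : List Char) :
    hcol ('_' :: t) = if t.dropWhile pU = [] then [] else '_' :: hcol (t.dropWhile pU) := by
  rw [hcol, if_pos rfl]

-- the split-on-'_' parts list (with empty parts), as a structural recursion
def consC (c : Char) : List (List Char) → List (List Char)
  | [] => [[c]]
  | p :: ps => (c :: p) :: ps

def partsU : List Char → List (List Char)
  | [] => [[]]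
  | c :: t => if c = '_' then [] :: partsU t else consC c (partsU t)

def consH (x : List Char) : List (List Char) → List (List Char)
  | [] => [x]
  | p :: ps => (x ++ p) :: ps

theorem partsU_ne_nil (s : List Char) : partsU s ≠ [] := by
  cases s with
  | nil => simp [partsU]
  | cons c t =>
    rw [partsU]
    split
    · simp
    · cases h : partsU t <;> simp [consC]

theorem splitOn_go_eq (fuel : Nat) : ∀ (l cur : List Char) (acc : List (List Char)), l.length < fuel →
    PySem.Chars.splitOn.go ['_'] fuel l cur acc
      = acc.reverse ++ consH cur.reverse (partsU l) := by
  induction fuel with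
  | zero => intro l cur acc h; omega
  | succ n ih =>
    intro l cur acc h
    match l with
    | [] => simp [PySem.Chars.splitOn.go, partsU, consH]
    | c :: t =>
      by_cases hc : c = '_'
      · subst hc
        have hpre : List.isPrefixOf ['_'] ('_'::t) = true := by simp [List.isPrefixOf]
        simp only [PySem.Chars.splitOn.go, hpre, if_pos, List.length_cons, List.length_nil,
          List.drop_succ_cons, List.drop_zero]
        rw [ih t [] (cur.reverse :: acc) (by simp at h ⊢; omega)]
        obtain ⟨pp, ps, hps⟩ : ∃ pp ps, partsU t = pp :: ps := by
          cases hx : partsU t with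
          | nil => exact absurd hx (partsU_ne_nil t)
          | cons a b => exact ⟨a, b, rfl⟩
        simp [partsU, hps, consH]
      · have hpre : List.isPrefixOf ['_'] (c::t) = false := by
          simp [List.isPrefixOf]; exact fun hco => hc hco.symm
        simp only [PySem.Chars.splitOn.go, hpre, Bool.false_eq_true, if_false]
        rw [ih t (c :: cur) acc (by simp at h ⊢; omega)]
        obtain ⟨pp, ps, hps⟩ : ∃ pp ps, partsU t = pp :: ps := by
          cases hx : partsU t with
          | nil => exact absurd hx (partsU_ne_nil t)
          | cons a b => exact ⟨a, b, rfl⟩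
        simp [partsU, hps, consH, hc, consC]

theorem splitOn_eq_partsU (s : List Char) :
    PySem.Chars.splitOn s ['_'] = partsU s := by
  rw [PySem.Chars.splitOn, splitOn_go_eq (s.length + 1) s [] [] (by omega)]
  obtain ⟨pp, ps, hps⟩ : ∃ pp ps, partsU s = pp :: ps := by
    cases hx : partsU s with
    | nil => exact absurd hx (partsU_ne_nil s)
    | cons a b => exact ⟨a, b, rfl⟩
  simp [hps, consH]

-- leading underscores contribute only empty parts
theorem filter_partsU_dropWhile (s : List Char) :
    ((partsU (s.dropWhile pU)).filter (· ≠ [])) = (partsU s).filter (· ≠ []) := by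
  induction s with
  | nil => rfl
  | cons c t ih =>
    by_cases hc : c = '_'
    · subst hc
      rw [List.dropWhile_cons_of_pos (by simp [pU])]
      rw [ih]
      simp [partsU]
    · rw [List.dropWhile_cons_of_neg (by simp [pU, hc])]

theorem interc_cons (sep x : List Char) (xs : List (List Char)) :
    List.intercalate sep (x :: xs)
      = x ++ (if xs = [] then [] else sep ++ List.intercalate sep xs) := by
  cases xs with
  | nil => simp [List.intercalate]
  | cons y ys => simp [List.intercalate, List.intersperse]

-- B's value: hcol after dropping leading underscores is the join of non-empty parts
theorem pU_head_dropWhile (l : List Char) (x : Char) (t3 : List Char)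
    (h : l.dropWhile pU = x :: t3) : x ≠ '_' := by
  induction l with
  | nil => simp [List.dropWhile] at h
  | cons a t4 ih4 =>
    rw [List.dropWhile_cons] at h
    split at h
    · exact ih4 h
    · rename_i hpa
      simp only [List.cons.injEq] at h
      obtain ⟨rfl, -⟩ := h
      simpa [pU] using hpa

theorem filter_cons_ne {x : List Char} (hx : x ≠ []) (xs : List (List Char)) :
    (x :: xs).filter (· ≠ []) = x :: xs.filter (· ≠ []) := by
  simp [hx]

-- B's value: hcol after dropping leading underscores is the join of non-empty parts
theorem hcol_eq_intercalate (s : List Char) :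
    hcol (s.dropWhile pU) = List.intercalate ['_'] ((partsU s).filter (· ≠ [])) := by
  match s with
  | [] => simp [partsU, hcol, List.intercalate]
  | c :: t =>
    by_cases hc : c = '_'
    · subst hc
      rw [List.dropWhile_cons_of_pos (by simp [pU])]
      rw [hcol_eq_intercalate t]
      simp [partsU]
    · rw [List.dropWhile_cons_of_neg (by simp [pU, hc]), hcol_cons_ne c t hc]
      match t with
      | [] => simp [partsU, consC, hc, hcol, List.intercalate]
      | d :: t2 =>
        by_cases hd : d = '_'
        · subst hd
          have hparts : (partsU ('_'::'_'::t2)).filter (· ≠ []) = (partsU t2).filter (· ≠ []) := by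
            simp [partsU]
          have hparts' : (partsU (c::'_'::t2)).filter (· ≠ []) = [c] :: (partsU t2).filter (· ≠ []) := by
            have h1 : partsU (c::'_'::t2) = [c] :: partsU t2 := by
              simp [partsU, consC, hc]
            rw [h1, filter_cons_ne (by simp)]
          rw [hcol_cons_us t2, hparts']
          have ih2 := hcol_eq_intercalate t2
          by_cases hdw : t2.dropWhile pU = []
          · rw [if_pos hdw]
            have hnil : (partsU t2).filter (· ≠ []) = [] := by
              rw [← filter_partsU_dropWhile t2, hdw]; simp [partsU]
            rw [hnil, interc_cons]; simp
          · rw [if_neg hdw]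
            obtain ⟨x, t3, hxt⟩ : ∃ x t3, t2.dropWhile pU = x :: t3 := by
              cases hh : t2.dropWhile pU with
              | nil => exact absurd hh hdw
              | cons a b => exact ⟨a, b, rfl⟩
            have hxne : x ≠ '_' := pU_head_dropWhile t2 x t3 hxt
            obtain ⟨pp, ps, hps⟩ : ∃ pp ps, partsU t3 = pp :: ps := by
              cases hz : partsU t3 with
              | nil => exact absurd hz (partsU_ne_nil t3)
              | cons a b => exact ⟨a, b, rfl⟩
            have hfil : (partsU t2).filter (· ≠ []) = (x :: pp) :: ps.filter (· ≠ []) := by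
              rw [← filter_partsU_dropWhile t2, hxt]
              have hx3 : partsU (x :: t3) = (x :: pp) :: ps := by
                simp [partsU, consC, hxne, hps]
              rw [hx3, filter_cons_ne (by simp)]
            rw [ih2, hfil, interc_cons, interc_cons]
            simp only [List.cons_append, List.nil_append, List.cons.injEq, true_and]
            by_cases hfps : ps.filter (· ≠ []) = []
            · simp [interc_cons]
            · simp [interc_cons]
        · -- head of t is an ordinary char: prepend c to the first (non-empty) part
          have ih := hcol_eq_intercalate (d :: t2)
          rw [List.dropWhile_cons_of_neg (by simp [pU, hd])] at ih
          obtain ⟨pp, ps, hps⟩ : ∃ pp ps, partsU t2 = pp :: ps := by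
            cases hz : partsU t2 with
            | nil => exact absurd hz (partsU_ne_nil t2)
            | cons a b => exact ⟨a, b, rfl⟩
          have h1 : partsU (d::t2) = (d :: pp) :: ps := by simp [partsU, consC, hd, hps]
          have h2 : partsU (c::d::t2) = (c :: d :: pp) :: ps := by
            simp [partsU, consC, hc, hd, hps]
          rw [ih, h1, h2, filter_cons_ne (by simp), filter_cons_ne (by simp),
            interc_cons, interc_cons]
          simp
termination_by s.length

theorem fpass_cons_ne (c : Char) (t : List Char) (hc : c ≠ '_') :
    fpass (c :: t) = c :: fpass t := by
  cases t with
  | nil => rfl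
  | cons d t2 => rw [fpass, if_neg (by tauto)]

theorem fpass_us_us (t : List Char) : fpass ('_' :: '_' :: t) = '_' :: fpass t := by
  rw [fpass, if_pos ⟨rfl, rfl⟩]

theorem fpass_eq_nil_iff (s : List Char) : fpass s = [] ↔ s = [] := by
  induction s using fpass.induct with
  | case1 => simp [fpass]
  | case2 c => simp [fpass]
  | case3 c d t hc ih => obtain ⟨rfl, rfl⟩ := hc; simp [fpass_us_us]
  | case4 c d t hc ih => rw [fpass, if_neg hc]; simp

theorem fpass_head? (s : List Char) : (fpass s).head? = s.head? := by
  induction s using fpass.induct with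
  | case1 => rfl
  | case2 c => rfl
  | case3 c d t hc ih => obtain ⟨rfl, rfl⟩ := hc; rw [fpass_us_us]; rfl
  | case4 c d t hc ih => rw [fpass, if_neg hc]; rfl

theorem takeWhile_rep (l : List Char) :
    l.takeWhile pU = List.replicate (l.takeWhile pU).length '_' := by
  rw [List.eq_replicate_iff]
  exact ⟨rfl, fun b hb => by simpa [pU] using List.mem_takeWhile_imp hb⟩

theorem head?_dropWhile_ne (l : List Char) : (l.dropWhile pU).head? ≠ some '_' := by
  cases h : l.dropWhile pU with
  | nil => simp
  | cons x t3 =>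
    simp only [List.head?_cons, ne_eq, Option.some.injEq]
    exact pU_head_dropWhile l x t3 h

theorem dropWhile_of_head (r : List Char) (hr : r.head? ≠ some '_') :
    r.dropWhile pU = r := by
  cases r with
  | nil => rfl
  | cons c t => rw [List.dropWhile_cons_of_neg (by simpa [pU] using hr)]

theorem fpass_rep_append (k : Nat) (r : List Char) (hr : r.head? ≠ some '_') :
    fpass (List.replicate k '_' ++ r) = List.replicate ((k+1)/2) '_' ++ fpass r := by
  match k with
  | 0 => simp
  | 1 =>
    cases r with
    | nil => simp [fpass, List.replicate]
    | cons c t =>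
      have hcne : c ≠ '_' := by simpa using hr
      rw [show List.replicate 1 '_' ++ (c :: t) = '_' :: c :: t by simp [List.replicate]]
      rw [fpass, if_neg (by tauto)]
      rw [fpass_cons_ne c t hcne]
      simp [List.replicate]
  | k+2 =>
    rw [show List.replicate (k+2) '_' ++ r = '_' :: '_' :: (List.replicate k '_' ++ r) by
      simp [List.replicate]]
    rw [fpass_us_us, fpass_rep_append k r hr]
    rw [show ((k+2)+1)/2 = (k+1)/2 + 1 by omega]
    simp [List.replicate]

theorem hcol_rep_append (j : Nat) (hj : 1 ≤ j) (r : List Char) (hr : r.head? ≠ some '_') :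
    hcol (List.replicate j '_' ++ r) = if r = [] then [] else '_' :: hcol r := by
  obtain ⟨j', rfl⟩ : ∃ j', j = j' + 1 := ⟨j - 1, by omega⟩
  rw [show List.replicate (j'+1) '_' ++ r = '_' :: (List.replicate j' '_' ++ r) by
    simp [List.replicate]]
  rw [hcol_cons_us]
  have hdw : (List.replicate j' '_' ++ r).dropWhile pU = r := by
    rw [List.dropWhile_append]
    rw [show List.dropWhile pU (List.replicate j' '_') = [] by
      rw [List.dropWhile_replicate]; simp [pU]]
    simpa using dropWhile_of_head r hr
  rw [hdw]

theorem hcol_fpass (s : List Char) : hcol (fpass s) = hcol s := by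
  match s with
  | [] => rfl
  | c :: t =>
    by_cases hc : c = '_'
    · subst hc
      have hr : (t.dropWhile pU).head? ≠ some '_' := head?_dropWhile_ne t
      have hs : '_' :: t
          = List.replicate ((t.takeWhile pU).length + 1) '_' ++ t.dropWhile pU := by
        conv_lhs => rw [← List.takeWhile_append_dropWhile (p := pU) (l := t)]
        rw [show List.replicate ((t.takeWhile pU).length + 1) '_'
            = '_' :: List.replicate (t.takeWhile pU).length '_' by simp [List.replicate]]
        rw [← takeWhile_rep, List.cons_append]
      rw [hs, fpass_rep_append _ _ hr,
        hcol_rep_append _ (by omega) _ (by rw [fpass_head?]; exact hr),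
        hcol_rep_append _ (by omega) _ hr]
      by_cases hrn : t.dropWhile pU = []
      · rw [if_pos hrn, if_pos (by rw [hrn]; rfl)]
      · rw [if_neg hrn, if_neg (by simpa [fpass_eq_nil_iff] using hrn)]
        rw [hcol_fpass (t.dropWhile pU)]
    · rw [fpass_cons_ne c t hc, hcol_cons_ne _ _ hc, hcol_cons_ne _ _ hc, hcol_fpass t]
termination_by s.length
decreasing_by
  · have := List.length_dropWhile_le pU t; simp; omega
  · simp

theorem hcol_append_rep (s : List Char) (k : Nat) :
    hcol (s ++ List.replicate k '_') = hcol s := by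
  match s with
  | [] =>
    match k with
    | 0 => rfl
    | k+1 =>
      rw [show ([] : List Char) ++ List.replicate (k+1) '_' = '_' :: List.replicate k '_' by
        simp [List.replicate]]
      rw [hcol_cons_us]
      rw [show List.dropWhile pU (List.replicate k '_') = [] by
        rw [List.dropWhile_replicate]; simp [pU]]
      rw [if_pos rfl, hcol_nil]
  | c :: t =>
    by_cases hc : c = '_'
    · subst hc
      rw [show ('_' :: t) ++ List.replicate k '_' = '_' :: (t ++ List.replicate k '_') by simp]
      rw [hcol_cons_us, hcol_cons_us]
      by_cases hdw : t.dropWhile pU = []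
      · rw [if_pos hdw]
        rw [show List.dropWhile pU (t ++ List.replicate k '_') = [] by
          rw [List.dropWhile_append, hdw]
          simp [pU]]
        rw [if_pos rfl]
      · rw [if_neg hdw]
        rw [show List.dropWhile pU (t ++ List.replicate k '_')
            = t.dropWhile pU ++ List.replicate k '_' by
          rw [List.dropWhile_append]; simp [hdw]]
        rw [if_neg (by simp [hdw]), hcol_append_rep (t.dropWhile pU) k]
    · rw [show (c :: t) ++ List.replicate k '_' = c :: (t ++ List.replicate k '_') by simp]
      rw [hcol_cons_ne _ _ hc, hcol_cons_ne _ _ hc, hcol_append_rep t k]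
termination_by s.length
decreasing_by
  · have := List.length_dropWhile_le pU t; simp; omega
  · simp

theorem getLast?_cons_of_ne_nil (c : Char) (t : List Char) (ht : t ≠ []) :
    (c :: t).getLast? = t.getLast? := by
  cases t with
  | nil => exact absurd rfl ht
  | cons d t2 => exact List.getLast?_cons_cons

theorem hcol_eq_self (s : List Char) (hnd : noDD s = true) (htr : s.getLast? ≠ some '_') :
    hcol s = s := by
  induction s using noDD.induct with
  | case1 => exact hcol_nil
  | case2 c =>
    have hcne : c ≠ '_' := by simpa using htr
    rw [hcol_cons_ne _ _ hcne, hcol_nil]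
  | case3 c d t hc =>
    obtain ⟨rfl, rfl⟩ := hc; simp [noDD] at hnd
  | case4 c d t hc ih =>
    rw [noDD, if_neg hc] at hnd
    rw [getLast?_cons_of_ne_nil c (d :: t) (by simp)] at htr
    by_cases hcu : c = '_'
    · subst hcu
      have hd : d ≠ '_' := fun hd => hc ⟨rfl, hd⟩
      rw [hcol_cons_us]
      rw [List.dropWhile_cons_of_neg (by simp [pU, hd])]
      rw [if_neg (by simp)]
      rw [ih hnd htr]
    · rw [hcol_cons_ne _ _ hcu, ih hnd htr]

theorem fpass_noTr (s : List Char) (h : s.getLast? ≠ some '_') :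
    (fpass s).getLast? ≠ some '_' := by
  induction s using fpass.induct with
  | case1 => exact h
  | case2 c => simpa [fpass] using h
  | case3 c d t hc ih =>
    obtain ⟨rfl, rfl⟩ := hc
    rw [fpass_us_us]
    match t, ih with
    | [], _ => simp at h
    | e :: t2, ih =>
      rw [List.getLast?_cons_cons, List.getLast?_cons_cons] at h
      have := ih h
      rw [getLast?_cons_of_ne_nil '_' (fpass (e :: t2))
        (by rw [ne_eq, fpass_eq_nil_iff]; simp)]
      exact this
  | case4 c d t hc ih =>
    rw [fpass, if_neg hc]
    rw [getLast?_cons_of_ne_nil c (d :: t) (by simp)] at h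
    have := ih h
    rw [getLast?_cons_of_ne_nil c (fpass (d :: t))
      (by rw [ne_eq, fpass_eq_nil_iff]; simp)]
    exact this

def loopC (s : List Char) : List Char :=
  if noDD s then s else loopC (fpass s)
termination_by s.length
decreasing_by
  rename_i h
  exact fpass_length_lt s (Bool.eq_false_iff.mpr h)

theorem loopC_eq_hcol (s : List Char) (h : s.getLast? ≠ some '_') :
    loopC s = hcol s := by
  rw [loopC]
  by_cases hnd : noDD s = true
  · rw [if_pos hnd, hcol_eq_self s hnd h]
  · rw [if_neg hnd, loopC_eq_hcol (fpass s) (fpass_noTr s h), hcol_fpass]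
termination_by s.length
decreasing_by exact fpass_length_lt s (Bool.eq_false_iff.mpr hnd)

theorem collapseA_toList (t : String) : (collapseA t).toList = loopC t.toList := by
  rw [collapseA, loopC]
  have hcond : (PySem.Str.isIn "__" t = true) ↔ (noDD t.toList = false) := by
    rw [PySem.Str.isIn_eq, show ("__" : String).toList = ['_','_'] from rfl,
      isIn_dd_eq_not_noDD]
    cases noDD t.toList <;> simp
  by_cases hin : PySem.Str.isIn "__" t = true
  · rw [if_pos hin, if_neg (by simp [hcond.mp hin])]
    rw [collapseA_toList (PySem.Str.replace t "__" "_")]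
    congr 1
    rw [PySem.Str.toList_replace,
      show ("__" : String).toList = ['_','_'] from rfl,
      show ("_" : String).toList = ['_'] from rfl,
      replace_dd_eq_fpass]
  · rw [if_neg hin, if_pos]
    have : noDD t.toList ≠ false := fun hf => hin (hcond.mpr hf)
    simpa using this
termination_by t.toList.length
decreasing_by
  have h' : noDD t.toList = false := hcond.mp hin
  simpa [PySem.Str.toList_replace, replace_dd_eq_fpass] using fpass_length_lt t.toList h'

theorem perTag_chars (s : List Char) :
    loopC (PySem.Chars.stripChars s ['_'])
      = List.intercalate ['_'] ((partsU s).filter (· ≠ [])) := by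
  have hp : (fun c => (['_'] : List Char).contains c) = pU := by
    funext c; simp [pU]
  have h0 : PySem.Chars.stripChars s ['_']
      = ((s.dropWhile pU).reverse.dropWhile pU).reverse := by
    simp only [PySem.Chars.stripChars, hp]
  set m := s.dropWhile pU with hm
  set m' := (m.reverse.dropWhile pU).reverse with hm'
  have htr : m'.getLast? ≠ some '_' := by
    rw [hm', List.getLast?_reverse]
    exact head?_dropWhile_ne m.reverse
  have hdecomp : m = m' ++ List.replicate (m.reverse.takeWhile pU).length '_' := by
    conv_lhs => rw [← List.reverse_reverse m,
      ← List.takeWhile_append_dropWhile (p := pU) (l := m.reverse)]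
    rw [List.reverse_append, hm']
    congr 1
    rw [takeWhile_rep m.reverse, List.reverse_replicate, List.length_replicate]
  rw [h0, loopC_eq_hcol _ htr]
  have : hcol m' = hcol m := by
    conv_rhs => rw [hdecomp]
    rw [hcol_append_rep]
  rw [this, hm, hcol_eq_intercalate]

theorem ofList_beq_empty (p : List Char) :
    (String.ofList p == "") = decide (p = []) := by
  by_cases hp : p = []
  · subst hp; rfl
  · rw [decide_eq_false hp]
    rw [beq_eq_false_iff_ne]
    intro h
    apply hp
    have := congrArg String.toList h
    simpa using this

theorem perTag (x : String) :
    collapseA (PySem.Str.stripChars x "_")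
      = PySem.Str.join "_" (((PySem.Str.split? x "_").getD []).filter (fun part => !(part == ""))) := by
  apply String.toList_inj.mp
  -- A side
  rw [collapseA_toList, PySem.Str.toList_stripChars,
    show ("_" : String).toList = ['_'] from rfl, perTag_chars]
  -- B side
  have hsplit : PySem.Str.split? x "_"
      = some ((PySem.Chars.splitOn x.toList ['_']).map String.ofList) := by
    simp [PySem.Str.split?, PySem.Chars.split?,
      show ("_" : String).toList = ['_'] from rfl]
  rw [hsplit, Option.getD_some, List.filter_map]
  have hq : ((fun part => !(part == "")) ∘ String.ofList) = (fun p : List Char => decide (p ≠ [])) := by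
    funext p
    simp only [Function.comp_apply, ofList_beq_empty]
    by_cases hp : p = [] <;> simp [hp]
  rw [hq, PySem.Str.toList_join, show ("_" : String).toList = ['_'] from rfl]
  rw [List.map_map, show (String.toList ∘ String.ofList) = id by
    funext l; simp, List.map_id]
  rw [splitOn_eq_partsU, PySem.Chars.join]

-- ===== VERDICT (by name: the statement is the Claim_ definition above) =====
theorem normalize_tag_spaces_spec : Claim_equal_normalize_tag_spaces := by
  unfold Claim_equal_normalize_tag_spaces
  intro tags _
  unfold Spec_normalize_tag_spaces normalize_tag_spaces normalize_tag_spaces_alt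
  have hstep :
      (fun (normalized : List String) (tag : String) =>
        let t := PySem.Str.strip tag
        if t == "" then normalized
        else
          let t := PySem.Str.replace t " " "_"
          let t := PySem.Str.stripChars t "_"
          let t := collapseA t
          if t == "" then normalized else normalized ++ [t])
      = (fun (normalized : List String) (tag : String) =>
        let t := PySem.Str.strip tag
        if t == "" then normalized
        else
          let t := PySem.Str.replace t " " "_"
          let t := PySem.Str.join "_"
            (((PySem.Str.split? t "_").getD []).filter (fun part => !(part == "")))
          if t == "" then normalized else normalized ++ [t]) := by
    funext normalized tag
    simp only [perTag]
  rw [hstep]
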